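-- pv_equiv track=rewrite | github.com/SharonDiskin/dataBasesEx02 | DatastracturesEx02.py | makeAttributesFromCondition
-- ===== SOURCE A (Python) =====
-- def cleanCondition(condition) -> str:
--     #We swap all the relation operators with comma, so it is easier to split a condition string
--     #According to different rel ops
--     condition = condition.replace("OR", ",")
--     condition = condition.replace("AND", ",")
--     condition = condition.replace(">=", ",")
--     condition = condition.replace("<=", ",")
--     condition = condition.replace("=", ",")
--     condition = condition.replace(">", ",")
--     condition = condition.replace("<", ",")
--     return condition
--
-- def makeAttributesFromCondition(condition, tableR, tableS) -> list:
--     attributes = []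
--     condition = cleanCondition(condition)
--     conditionAttributes = condition.split(",")
--     for attribute in conditionAttributes:
--         attribute = attribute.strip()
--         if (attribute in tableS) or (attribute in tableR):
--             attributes.append(attribute)
--
--     return attributes
-- ===== SOURCE B (Python) =====
-- def makeAttributesFromCondition(condition, tableR, tableS) -> list:
--     # Single left-to-right scan: cut the condition at operator occurrences
--     # (tried in the order OR, AND, >=, <=, =, >, <), then keep the stripped
--     # tokens that name attributes of either table.
--     ops = ("OR", "AND", ">=", "<=", "=", ">", "<")
--     tokens = []
--     cur = []
--     i = 0
--     n = len(condition)
--     while i < n: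
--         for op in ops:
--             if condition.startswith(op, i):
--                 tokens.append("".join(cur))
--                 cur = []
--                 i += len(op)
--                 break
--         else:
--             cur.append(condition[i])
--             i += 1
--     tokens.append("".join(cur))
--     return [t for t in (tok.strip() for tok in tokens)
--             if t in tableS or t in tableR]
-- ===== Notes on version B (the rewrite author's own statement) =====
-- stated objective: alternative
-- what changed: Replaces the seven chained global str.replace passes plus split(',') by a single left-to-right scan that cuts the condition at operator occurrences (tried in the order OR, AND, >=, <=, =, >, <), filtering stripped tokens by table membership in one comprehension.
-- outside the precondition, e.g. on makeAttributesFromCondition('a,b', ['a', 'b'], []): A returns ['a', 'b'], B returns []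
import Mathlib
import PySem

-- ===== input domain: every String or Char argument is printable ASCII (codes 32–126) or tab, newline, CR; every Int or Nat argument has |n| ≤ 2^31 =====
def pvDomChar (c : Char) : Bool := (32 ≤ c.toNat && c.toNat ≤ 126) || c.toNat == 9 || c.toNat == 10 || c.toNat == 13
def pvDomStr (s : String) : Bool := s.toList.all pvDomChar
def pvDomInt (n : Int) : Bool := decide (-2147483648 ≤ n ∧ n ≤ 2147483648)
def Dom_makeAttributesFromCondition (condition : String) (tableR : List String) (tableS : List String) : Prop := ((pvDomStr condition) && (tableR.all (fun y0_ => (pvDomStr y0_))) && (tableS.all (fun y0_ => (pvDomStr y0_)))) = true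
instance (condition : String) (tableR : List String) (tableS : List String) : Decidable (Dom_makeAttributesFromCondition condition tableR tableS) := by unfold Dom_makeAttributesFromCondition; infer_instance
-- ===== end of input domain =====

-- B replaces the seven global str.replace passes + split(",") by a single left-to-right
-- scan that cuts the string at operator occurrences (alternative decomposition, one pass).

-- ===== PORT A =====
def cleanCondition (condition : String) : String :=
  let condition := PySem.Str.replace condition "OR" ","
  let condition := PySem.Str.replace condition "AND" ","
  let condition := PySem.Str.replace condition ">=" ","
  let condition := PySem.Str.replace condition "<=" ","
  let condition := PySem.Str.replace condition "=" ","
  let condition := PySem.Str.replace condition ">" ","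
  let condition := PySem.Str.replace condition "<" ","
  condition

def makeAttributesFromCondition (condition : String) (tableR : List String) (tableS : List String) : List String :=
  let attributes : List String := []
  let condition := cleanCondition condition
  -- condition.split(",") with the nonempty literal separator: exactly PySem.Chars.splitOn
  let conditionAttributes := (PySem.Chars.splitOn condition.toList [',']).map String.ofList
  conditionAttributes.foldl
    (fun attributes attr0 =>
      let attr := PySem.Str.strip attr0
      if tableS.contains attr || tableR.contains attr then attributes ++ [attr] else attributes)
    attributes

-- ===== PORT B =====
-- the operator tuple of Source B, in the same order
def pvOps : List (List Char) := [['O','R'], ['A','N','D'], ['>','='], ['<','='], ['='], ['>'], ['<']]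

-- Source B's while loop: the inner for/else over ops is the first op that matches at the
-- current position (List.find?); `cur` is the growing current token. Hand port, exact.
def tokGo (cur : List Char) (l : List Char) : List (List Char) :=
  match l with
  | [] => [cur]
  | c :: t =>
    match h : pvOps.find? (fun op => op.isPrefixOf (c :: t)) with
    | some op => cur :: tokGo [] ((c :: t).drop op.length)
    | none => tokGo (cur ++ [c]) t
termination_by l.length
decreasing_by
  · have hm := List.mem_of_find?_eq_some h
    have h1 : 1 ≤ op.length := by fin_cases hm <;> simp
    simp; omega
  · simp

def makeAttributesFromCondition_alt (condition : String) (tableR : List String) (tableS : List String) : List String :=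
  let tokens := (tokGo [] condition.toList).map String.ofList
  (tokens.map (fun tok => PySem.Str.strip tok)).filter
    (fun t => tableS.contains t || tableR.contains t)

-- ===== PRECONDITION & SPEC =====
-- Pre_ excludes conditions containing ',': A's comma sentinel then also splits at the
-- caller's own commas, an accidental reading of an unspecified corner that B does not share.
def Pre_makeAttributesFromCondition (condition : String) (tableR : List String) (tableS : List String) : Prop :=
  ',' ∉ condition.toList
instance (condition : String) (tableR : List String) (tableS : List String) : Decidable (Pre_makeAttributesFromCondition condition tableR tableS) := by unfold Pre_makeAttributesFromCondition; infer_instance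

def pvWitness_makeAttributesFromCondition : String × List String × List String :=
  ("a >= b OR c", ["a", "c"], ["b"])

def Spec_makeAttributesFromCondition (condition : String) (tableR : List String) (tableS : List String) (out : List String) : Prop := out = makeAttributesFromCondition_alt condition tableR tableS
instance (condition : String) (tableR : List String) (tableS : List String) (out : List String) : Decidable (Spec_makeAttributesFromCondition condition tableR tableS out) := by unfold Spec_makeAttributesFromCondition; infer_instance

-- ===== CLAIM (what is proved, stated in full; the proofs are below) =====
def Claim_equal_makeAttributesFromCondition : Prop := ∀ (condition : String) (tableR : List String) (tableS : List String), Dom_makeAttributesFromCondition condition tableR tableS → Pre_makeAttributesFromCondition condition tableR tableS → Spec_makeAttributesFromCondition condition tableR tableS (makeAttributesFromCondition condition tableR tableS)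

-- ===== LEMMAS AND PROOFS =====

-- cons a char / prepend a prefix onto the first piece of a token list
def consH (c : Char) : List (List Char) → List (List Char)
  | [] => [[c]]
  | x :: xs => (c :: x) :: xs

def consHL (pre : List Char) : List (List Char) → List (List Char)
  | [] => [pre]
  | x :: xs => (pre ++ x) :: xs

-- leftmost non-overlapping replacement of the nonempty pattern q::qs by ","
def rep (q : Char) (qs : List Char) : List Char → List Char
  | [] => []
  | c :: t =>
    if (q :: qs).isPrefixOf (c :: t) then ',' :: rep q qs (t.drop qs.length)
    else c :: rep q qs t
termination_by l => l.length
decreasing_by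
  · simp
  · simp

-- split on ','
def spl : List Char → List (List Char)
  | [] => [[]]
  | c :: t => if c = ',' then [] :: spl t else consH c (spl t)

-- accumulator-free form of tokGo
def tok : List Char → List (List Char)
  | [] => [[]]
  | c :: t =>
    match h : pvOps.find? (fun op => op.isPrefixOf (c :: t)) with
    | some op => [] :: tok ((c :: t).drop op.length)
    | none => consH c (tok t)
termination_by l => l.length
decreasing_by
  · have hm := List.mem_of_find?_eq_some h
    have h1 : 1 ≤ op.length := by fin_cases hm <;> simp
    simp; omega
  · simp

-- join with ','
def joinC : List (List Char) → List Char
  | [] => []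
  | [x] => x
  | x :: xs => x ++ ',' :: joinC xs

def clean7 (l : List Char) : List Char :=
  rep '<' [] (rep '>' [] (rep '=' [] (rep '<' ['='] (rep '>' ['='] (rep 'A' ['N','D'] (rep 'O' ['R'] l))))))

theorem rep_nil (q : Char) (qs : List Char) : rep q qs [] = [] := by simp [rep]

theorem rep_not (q : Char) (qs : List Char) (c : Char) (t : List Char)
    (h : (q :: qs).isPrefixOf (c :: t) = false) : rep q qs (c :: t) = c :: rep q qs t := by
  simp [rep, h]

theorem rep_ne (q : Char) (qs : List Char) (c : Char) (t : List Char) (h : c ≠ q) :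
    rep q qs (c :: t) = c :: rep q qs t := by
  refine rep_not q qs c t ?_
  simp [List.isPrefixOf]
  intro h'
  exact absurd h'.symm h

theorem rep_pre (q : Char) (qs t : List Char) :
    rep q qs (q :: (qs ++ t)) = ',' :: rep q qs t := by
  rw [rep]
  rw [if_pos, List.drop_left]
  rw [show q :: (qs ++ t) = (q :: qs) ++ t from rfl]
  exact List.isPrefixOf_iff_prefix.mpr (List.prefix_append _ _)

theorem rep_head (q : Char) (qs u : List Char) (d : Char)
    (h : (rep q qs u).head? = some d) : d = ',' ∨ u.head? = some d := by
  cases u with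
  | nil => simp [rep_nil] at h
  | cons c t =>
    rw [rep] at h
    split at h
    · simp at h; left; exact h.symm
    · simp at h; right; simp [h]

-- "ND" can only start rep-OR output where it started the input
theorem rep_or_ND (t : List Char) (h : (['N','D'] : List Char).isPrefixOf (rep 'O' ['R'] t) = true) :
    (['N','D'] : List Char).isPrefixOf t = true := by
  cases t with
  | nil => simp [rep_nil] at h
  | cons x r =>
    rw [rep] at h
    split at h
    · simp [List.isPrefixOf] at h
    · cases r with
      | nil => simp [rep_nil, List.isPrefixOf] at h
      | cons y r2 =>
        rw [rep] at h
        split at h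
        · simp [List.isPrefixOf] at h
        · simp [List.isPrefixOf] at h ⊢
          tauto

theorem tok_ne_nil (l : List Char) : tok l ≠ [] := by
  cases l with
  | nil => simp [tok]
  | cons c t =>
    rw [tok]
    split
    · simp
    · rcases h : tok t with _ | ⟨x, xs⟩ <;> simp [consH, h]

theorem spl_ne_nil (l : List Char) : spl l ≠ [] := by
  induction l with
  | nil => simp [spl]
  | cons c t ih =>
    rw [spl]
    split
    · simp
    · rcases h : spl t with _ | ⟨x, xs⟩ <;> simp [consH, h]

theorem joinC_cons_ne (x : List Char) (xs : List (List Char)) (h : xs ≠ []) :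
    joinC (x :: xs) = x ++ ',' :: joinC xs := by
  cases xs with
  | nil => exact absurd rfl h
  | cons y ys => rfl

theorem joinC_consH (c : Char) (ts : List (List Char)) (h : ts ≠ []) :
    joinC (consH c ts) = c :: joinC ts := by
  cases ts with
  | nil => exact absurd rfl h
  | cons x xs =>
    cases xs with
    | nil => rfl
    | cons y ys => rfl

theorem tok_op (c : Char) (t : List Char) (op : List Char)
    (hf : pvOps.find? (fun op => op.isPrefixOf (c :: t)) = some op) :
    tok (c :: t) = [] :: tok ((c :: t).drop op.length) := by
  rw [tok]
  split <;> simp_all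

theorem tok_none_eq (c : Char) (t : List Char)
    (hf : pvOps.find? (fun op => op.isPrefixOf (c :: t)) = none) :
    tok (c :: t) = consH c (tok t) := by
  rw [tok]
  split <;> simp_all

theorem single_prefix (d : Char) (u : List Char) :
    (([d] : List Char).isPrefixOf u) = true ↔ u.head? = some d := by
  cases u with
  | nil => simp [List.isPrefixOf]
  | cons a w => simp [List.isPrefixOf]; constructor <;> (intro h; exact h.symm)

theorem two_not_prefix (x y : Char) (v : List Char) (hv : v.head? ≠ some y) :
    (([x, y] : List Char).isPrefixOf (x :: v)) = false := by
  cases v with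
  | nil => simp [List.isPrefixOf]
  | cons a w =>
    simp [List.isPrefixOf]
    intro h
    exact absurd (by simp [h.symm] : (a :: w).head? = some y) hv

theorem joinC_cons_tok (u : List Char) : joinC ([] :: tok u) = ',' :: joinC (tok u) := by
  rw [joinC_cons_ne [] (tok u) (tok_ne_nil u)]
  simp

-- the main lemma: the seven chained replacements produce the scanner's tokens joined by ','
theorem clean7_eq_joinC_tok : ∀ n l, l.length ≤ n → clean7 l = joinC (tok l) := by
  intro n
  induction n with
  | zero =>
    intro l hl
    have : l = [] := by cases l <;> simp_all
    subst this
    simp [clean7, rep_nil, tok, joinC]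
  | succ n ih =>
    intro l hl
    rcases l with _ | ⟨c, t⟩
    · simp [clean7, rep_nil, tok, joinC]
    · by_cases h1 : (['O','R'] : List Char).isPrefixOf (c :: t) = true
      · -- operator OR at the head
        obtain ⟨u, hu⟩ := List.isPrefixOf_iff_prefix.mp h1
        simp only [List.cons_append, List.nil_append] at hu
        obtain ⟨rfl, rfl⟩ : c = 'O' ∧ t = 'R' :: u := by
          cases hu; exact ⟨rfl, rfl⟩
        have hf : pvOps.find? (fun op => op.isPrefixOf ('O' :: 'R' :: u)) = some ['O','R'] := by
          simp [pvOps, List.find?, List.isPrefixOf]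
        rw [tok_op _ _ _ hf]
        simp only [clean7]
        rw [show ('O' :: 'R' :: u : List Char) = 'O' :: (['R'] ++ u) from rfl, rep_pre]
        rw [rep_ne 'A' ['N','D'] ',' _ (by decide), rep_ne '>' ['='] ',' _ (by decide),
            rep_ne '<' ['='] ',' _ (by decide), rep_ne '=' [] ',' _ (by decide),
            rep_ne '>' [] ',' _ (by decide), rep_ne '<' [] ',' _ (by decide)]
        rw [joinC_cons_tok]
        have := ih u (by simp at hl; omega)
        simp only [clean7] at this
        simp [this]
      · rw [Bool.not_eq_true] at h1
        by_cases h2 : (['A','N','D'] : List Char).isPrefixOf (c :: t) = true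
        · -- operator AND at the head
          obtain ⟨u, hu⟩ := List.isPrefixOf_iff_prefix.mp h2
          simp only [List.cons_append, List.nil_append] at hu
          obtain ⟨rfl, rfl⟩ : c = 'A' ∧ t = 'N' :: 'D' :: u := by
            cases hu; exact ⟨rfl, rfl⟩
          have hf : pvOps.find? (fun op => op.isPrefixOf ('A' :: 'N' :: 'D' :: u)) = some ['A','N','D'] := by
            simp [pvOps, List.find?, List.isPrefixOf]
          rw [tok_op _ _ _ hf]
          simp only [clean7]
          rw [rep_ne 'O' ['R'] 'A' _ (by decide), rep_ne 'O' ['R'] 'N' _ (by decide),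
              rep_ne 'O' ['R'] 'D' _ (by decide)]
          rw [show ('A' :: 'N' :: 'D' :: rep 'O' ['R'] u : List Char)
                = 'A' :: (['N','D'] ++ rep 'O' ['R'] u) from rfl, rep_pre]
          rw [rep_ne '>' ['='] ',' _ (by decide), rep_ne '<' ['='] ',' _ (by decide),
              rep_ne '=' [] ',' _ (by decide), rep_ne '>' [] ',' _ (by decide),
              rep_ne '<' [] ',' _ (by decide)]
          rw [joinC_cons_tok]
          have := ih u (by simp at hl; omega)
          simp only [clean7] at this
          simp [this]
        · rw [Bool.not_eq_true] at h2
          by_cases h3 : (['>','='] : List Char).isPrefixOf (c :: t) = true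
          · -- operator >= at the head
            obtain ⟨u, hu⟩ := List.isPrefixOf_iff_prefix.mp h3
            simp only [List.cons_append, List.nil_append] at hu
            obtain ⟨rfl, rfl⟩ : c = '>' ∧ t = '=' :: u := by
              cases hu; exact ⟨rfl, rfl⟩
            have hf : pvOps.find? (fun op => op.isPrefixOf ('>' :: '=' :: u)) = some ['>','='] := by
              simp [pvOps, List.find?, List.isPrefixOf]
            rw [tok_op _ _ _ hf]
            simp only [clean7]
            rw [rep_ne 'O' ['R'] '>' _ (by decide), rep_ne 'O' ['R'] '=' _ (by decide),
                rep_ne 'A' ['N','D'] '>' _ (by decide), rep_ne 'A' ['N','D'] '=' _ (by decide)]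
            rw [show ('>' :: '=' :: rep 'A' ['N','D'] (rep 'O' ['R'] u) : List Char)
                  = '>' :: (['='] ++ rep 'A' ['N','D'] (rep 'O' ['R'] u)) from rfl, rep_pre]
            rw [rep_ne '<' ['='] ',' _ (by decide), rep_ne '=' [] ',' _ (by decide),
                rep_ne '>' [] ',' _ (by decide), rep_ne '<' [] ',' _ (by decide)]
            rw [joinC_cons_tok]
            have := ih u (by simp at hl; omega)
            simp only [clean7] at this
            simp [this]
          · rw [Bool.not_eq_true] at h3
            by_cases h4 : (['<','='] : List Char).isPrefixOf (c :: t) = true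
            · -- operator <= at the head
              obtain ⟨u, hu⟩ := List.isPrefixOf_iff_prefix.mp h4
              simp only [List.cons_append, List.nil_append] at hu
              obtain ⟨rfl, rfl⟩ : c = '<' ∧ t = '=' :: u := by
                cases hu; exact ⟨rfl, rfl⟩
              have hf : pvOps.find? (fun op => op.isPrefixOf ('<' :: '=' :: u)) = some ['<','='] := by
                simp [pvOps, List.find?, List.isPrefixOf]
              rw [tok_op _ _ _ hf]
              simp only [clean7]
              rw [rep_ne 'O' ['R'] '<' _ (by decide), rep_ne 'O' ['R'] '=' _ (by decide),
                  rep_ne 'A' ['N','D'] '<' _ (by decide), rep_ne 'A' ['N','D'] '=' _ (by decide),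
                  rep_ne '>' ['='] '<' _ (by decide), rep_ne '>' ['='] '=' _ (by decide)]
              rw [show ('<' :: '=' :: rep '>' ['='] (rep 'A' ['N','D'] (rep 'O' ['R'] u)) : List Char)
                    = '<' :: (['='] ++ rep '>' ['='] (rep 'A' ['N','D'] (rep 'O' ['R'] u))) from rfl, rep_pre]
              rw [rep_ne '=' [] ',' _ (by decide), rep_ne '>' [] ',' _ (by decide),
                  rep_ne '<' [] ',' _ (by decide)]
              rw [joinC_cons_tok]
              have := ih u (by simp at hl; omega)
              simp only [clean7] at this
              simp [this]
            · rw [Bool.not_eq_true] at h4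
              by_cases h5 : (['='] : List Char).isPrefixOf (c :: t) = true
              · -- operator = at the head
                have hc : c = '=' := by
                  have := (single_prefix '=' (c :: t)).mp h5
                  simpa using this
                subst hc
                have hf : pvOps.find? (fun op => op.isPrefixOf ('=' :: t)) = some ['='] := by
                  simp [pvOps, List.find?, List.isPrefixOf]
                rw [tok_op _ _ _ hf]
                simp only [clean7]
                rw [rep_ne 'O' ['R'] '=' _ (by decide), rep_ne 'A' ['N','D'] '=' _ (by decide),
                    rep_ne '>' ['='] '=' _ (by decide), rep_ne '<' ['='] '=' _ (by decide)]
                rw [show ('=' :: rep '<' ['='] (rep '>' ['='] (rep 'A' ['N','D'] (rep 'O' ['R'] t))) : List Char)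
                      = '=' :: ([] ++ rep '<' ['='] (rep '>' ['='] (rep 'A' ['N','D'] (rep 'O' ['R'] t)))) from rfl,
                    rep_pre]
                rw [rep_ne '>' [] ',' _ (by decide), rep_ne '<' [] ',' _ (by decide)]
                rw [joinC_cons_tok]
                have := ih t (by simp at hl; omega)
                simp only [clean7] at this
                simp [this]
              · rw [Bool.not_eq_true] at h5
                have hc5 : c ≠ '=' := by
                  intro hc; subst hc; simp [single_prefix] at h5
                by_cases h6 : (['>'] : List Char).isPrefixOf (c :: t) = true
                · -- operator > at the head (and not >=)
                  have hc : c = '>' := by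
                    have := (single_prefix '>' (c :: t)).mp h6
                    simpa using this
                  subst hc
                  have ht : t.head? ≠ some '=' := by
                    intro hh
                    cases t with
                    | nil => simp at hh
                    | cons a w =>
                      simp at hh
                      subst hh
                      simp [List.isPrefixOf] at h3
                  have h3' : (['='] : List Char).isPrefixOf t = false := by
                    simpa [List.isPrefixOf] using h3
                  have hf : pvOps.find? (fun op => op.isPrefixOf ('>' :: t)) = some ['>'] := by
                    simp [pvOps, List.find?, List.isPrefixOf, h3']
                  rw [tok_op _ _ _ hf]
                  simp only [clean7]
                  rw [rep_ne 'O' ['R'] '>' _ (by decide), rep_ne 'A' ['N','D'] '>' _ (by decide)]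
                  have hhead : (rep 'A' ['N','D'] (rep 'O' ['R'] t)).head? ≠ some '=' := by
                    intro hh
                    rcases rep_head _ _ _ _ hh with h' | h'
                    · exact absurd h' (by decide)
                    · rcases rep_head _ _ _ _ h' with h'' | h''
                      · exact absurd h'' (by decide)
                      · exact ht h''
                  rw [rep_not _ _ _ _ (two_not_prefix '>' '=' _ hhead)]
                  rw [rep_ne '<' ['='] '>' _ (by decide), rep_ne '=' [] '>' _ (by decide)]
                  rw [show ('>' :: rep '=' [] (rep '<' ['='] (rep '>' ['='] (rep 'A' ['N','D'] (rep 'O' ['R'] t)))) : List Char)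
                        = '>' :: ([] ++ rep '=' [] (rep '<' ['='] (rep '>' ['='] (rep 'A' ['N','D'] (rep 'O' ['R'] t))))) from rfl,
                      rep_pre]
                  rw [rep_ne '<' [] ',' _ (by decide)]
                  rw [joinC_cons_tok]
                  have := ih t (by simp at hl; omega)
                  simp only [clean7] at this
                  simp [this]
                · rw [Bool.not_eq_true] at h6
                  have hc6 : c ≠ '>' := by
                    intro hc; subst hc; simp [single_prefix] at h6
                  by_cases h7 : (['<'] : List Char).isPrefixOf (c :: t) = true
                  · -- operator < at the head (and not <=)
                    have hc : c = '<' := by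
                      have := (single_prefix '<' (c :: t)).mp h7
                      simpa using this
                    subst hc
                    have ht : t.head? ≠ some '=' := by
                      intro hh
                      cases t with
                      | nil => simp at hh
                      | cons a w =>
                        simp at hh
                        subst hh
                        simp [List.isPrefixOf] at h4
                    have h4' : (['='] : List Char).isPrefixOf t = false := by
                      simpa [List.isPrefixOf] using h4
                    have hf : pvOps.find? (fun op => op.isPrefixOf ('<' :: t)) = some ['<'] := by
                      simp [pvOps, List.find?, List.isPrefixOf, h4']
                    rw [tok_op _ _ _ hf]
                    simp only [clean7]
                    rw [rep_ne 'O' ['R'] '<' _ (by decide), rep_ne 'A' ['N','D'] '<' _ (by decide),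
                        rep_ne '>' ['='] '<' _ (by decide)]
                    have hhead : (rep '>' ['='] (rep 'A' ['N','D'] (rep 'O' ['R'] t))).head? ≠ some '=' := by
                      intro hh
                      rcases rep_head _ _ _ _ hh with h' | h'
                      · exact absurd h' (by decide)
                      · rcases rep_head _ _ _ _ h' with h'' | h''
                        · exact absurd h'' (by decide)
                        · rcases rep_head _ _ _ _ h'' with h3' | h3'
                          · exact absurd h3' (by decide)
                          · exact ht h3'
                    rw [rep_not _ _ _ _ (two_not_prefix '<' '=' _ hhead)]
                    rw [rep_ne '=' [] '<' _ (by decide), rep_ne '>' [] '<' _ (by decide)]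
                    rw [show ('<' :: rep '>' [] (rep '=' [] (rep '<' ['='] (rep '>' ['='] (rep 'A' ['N','D'] (rep 'O' ['R'] t))))) : List Char)
                          = '<' :: ([] ++ rep '>' [] (rep '=' [] (rep '<' ['='] (rep '>' ['='] (rep 'A' ['N','D'] (rep 'O' ['R'] t)))))) from rfl,
                        rep_pre]
                    rw [joinC_cons_tok]
                    have := ih t (by simp at hl; omega)
                    simp only [clean7] at this
                    simp [this]
                  · -- no operator at the head
                    rw [Bool.not_eq_true] at h7
                    have hc7 : c ≠ '<' := by
                      intro hc; subst hc; simp [single_prefix] at h7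
                    have hf : pvOps.find? (fun op => op.isPrefixOf (c :: t)) = none := by
                      simp [pvOps, List.find?, h1, h2, h3, h4, h5, h6, h7]
                    rw [tok_none_eq _ _ hf]
                    simp only [clean7]
                    rw [rep_not _ _ _ _ h1]
                    have hAND : (['A','N','D'] : List Char).isPrefixOf (c :: rep 'O' ['R'] t) = false := by
                      by_contra hcon
                      rw [Bool.not_eq_false] at hcon
                      simp only [List.isPrefixOf, Bool.and_eq_true, beq_iff_eq] at hcon
                      have hND := rep_or_ND t hcon.2
                      have : (['A','N','D'] : List Char).isPrefixOf (c :: t) = true := by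
                        simp only [List.isPrefixOf, Bool.and_eq_true, beq_iff_eq]
                        exact ⟨hcon.1, hND⟩
                      simp [this] at h2
                    rw [rep_not _ _ _ _ hAND]
                    rw [rep_ne '>' ['='] c _ hc6, rep_ne '<' ['='] c _ hc7,
                        rep_ne '=' [] c _ hc5, rep_ne '>' [] c _ hc6,
                        rep_ne '<' [] c _ hc7]
                    rw [joinC_consH c (tok t) (tok_ne_nil t)]
                    have := ih t (by simp at hl; omega)
                    simp only [clean7] at this
                    simp [this]

-- tokens of a comma-free string are comma-free
theorem tok_comma_free : ∀ n l, l.length ≤ n → ',' ∉ l → ∀ x ∈ tok l, ',' ∉ x := by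
  intro n
  induction n with
  | zero =>
    intro l hl _hcf x hx
    have : l = [] := by cases l <;> simp_all
    subst this
    simp [tok] at hx
    simp [hx]
  | succ n ih =>
    intro l hl hcf x hx
    rcases l with _ | ⟨c, t⟩
    · simp [tok] at hx; simp [hx]
    · rcases hf : pvOps.find? (fun op => op.isPrefixOf (c :: t)) with _ | op
      · rw [tok_none_eq _ _ hf] at hx
        rcases htok : tok t with _ | ⟨y, ys⟩
        · exact absurd htok (tok_ne_nil t)
        · rw [htok] at hx
          simp [consH] at hx
          simp at hcf
          rcases hx with rfl | hx
          · intro hmem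
            rcases List.mem_cons.mp hmem with h' | h'
            · exact hcf.1 h'
            · exact ih t (by simp at hl; omega) hcf.2 y (by simp [htok]) h'
          · exact ih t (by simp at hl; omega) hcf.2 x (by simp [htok, hx])
      · rw [tok_op _ _ _ hf] at hx
        rcases List.mem_cons.mp hx with rfl | hx
        · simp
        · have hop : 1 ≤ op.length := by
            have hm := List.mem_of_find?_eq_some hf
            fin_cases hm <;> simp
          refine ih ((c :: t).drop op.length) (by simp at hl ⊢; omega) ?_ x hx
          intro hmem
          exact hcf (List.drop_subset _ _ hmem)

theorem spl_comma_free (x : List Char) (h : ',' ∉ x) : spl x = [x] := by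
  induction x with
  | nil => rfl
  | cons c t ih =>
    simp at h
    rw [spl, if_neg (fun hh => h.1 hh.symm), ih h.2]
    rfl

theorem spl_append_comma (x u : List Char) (h : ',' ∉ x) :
    spl (x ++ ',' :: u) = x :: spl u := by
  induction x with
  | nil => simp [spl]
  | cons c t ih =>
    simp at h
    rw [List.cons_append, spl, if_neg (fun hh => h.1 hh.symm), ih h.2]
    rfl

theorem spl_joinC (ts : List (List Char)) (hne : ts ≠ []) (h : ∀ x ∈ ts, ',' ∉ x) :
    spl (joinC ts) = ts := by
  induction ts with
  | nil => exact absurd rfl hne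
  | cons x xs ih =>
    cases xs with
    | nil => exact spl_comma_free x (h x (by simp))
    | cons y ys =>
      rw [joinC_cons_ne x (y :: ys) (by simp)]
      rw [spl_append_comma x _ (h x (by simp))]
      rw [ih (by simp) (fun z hz => h z (by simp [hz]))]

-- bridge: PySem.Chars.replace with a nonempty pattern and replacement "," is rep
theorem replace_go_eq (q : Char) (qs : List Char) :
    ∀ n l acc, l.length ≤ n →
      PySem.Chars.replace.go (q :: qs) [','] n l acc = acc.reverse ++ rep q qs l := by
  intro n
  induction n with
  | zero =>
    intro l acc hl
    have : l = [] := by cases l <;> simp_all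
    subst this
    rw [PySem.Chars.replace.go.eq_def]
    simp [rep_nil]
  | succ n ih =>
    intro l acc hl
    cases l with
    | nil => rw [PySem.Chars.replace.go.eq_def]; simp [rep_nil]
    | cons c t =>
      rw [PySem.Chars.replace.go.eq_def]
      simp only []
      by_cases hp : (q :: qs).isPrefixOf (c :: t) = true
      · rw [if_pos hp]
        have hlen : ((c :: t).drop (q :: qs).length).length ≤ n := by
          simp at hl ⊢; omega
        rw [ih _ _ hlen]
        rw [rep]
        rw [if_pos hp]
        simp
      · rw [if_neg hp]
        have hlen : t.length ≤ n := by simp at hl; omega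
        rw [ih _ _ hlen]
        rw [rep, if_neg (by simpa using hp)]
        simp

theorem replace_eq_rep (q : Char) (qs l : List Char) :
    PySem.Chars.replace l (q :: qs) [','] = rep q qs l := by
  rw [PySem.Chars.replace]
  simp only [List.isEmpty_cons, if_false]
  simpa using replace_go_eq q qs l.length l [] le_rfl

-- bridge: PySem.Chars.splitOn on "," is spl
theorem splitOn_go_eq :
    ∀ n l cur acc, l.length < n →
      PySem.Chars.splitOn.go [','] n l cur acc = acc.reverse ++ consHL cur.reverse (spl l) := by
  intro n
  induction n with
  | zero => intro l cur acc hl; omega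
  | succ n ih =>
    intro l cur acc hl
    cases l with
    | nil => rw [PySem.Chars.splitOn.go.eq_def]; simp [spl, consHL]
    | cons c t =>
      rw [PySem.Chars.splitOn.go.eq_def]
      simp only []
      by_cases hc : c = ','
      · subst hc
        rw [if_pos (by simp [List.isPrefixOf])]
        have hlen : t.length < n := by simp at hl; omega
        rw [show List.drop ([','] : List Char).length (',' :: t) = t from rfl]
        rw [ih _ _ _ hlen]
        rcases h : spl t with _ | ⟨x, xs⟩
        · exact absurd h (spl_ne_nil t)
        · simp [spl, consHL, h]
      · rw [if_neg (show ¬ ((([','] : List Char).isPrefixOf (c :: t)) = true) from by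
          simp [List.isPrefixOf]; exact fun hh => hc hh.symm)]
        have hlen : t.length < n := by simp at hl; omega
        rw [ih _ _ _ hlen]
        rcases h : spl t with _ | ⟨x, xs⟩
        · exact absurd h (spl_ne_nil t)
        · rw [spl, if_neg hc, h]
          simp [consHL, consH]

theorem splitOn_eq_spl (l : List Char) : PySem.Chars.splitOn l [','] = spl l := by
  rw [PySem.Chars.splitOn, splitOn_go_eq (l.length + 1) l [] [] (by omega)]
  rcases h : spl l with _ | ⟨x, xs⟩
  · exact absurd h (spl_ne_nil l)
  · simp [consHL]

theorem tokGo_op_eq (cur : List Char) (c : Char) (t : List Char) (op : List Char)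
    (hf : pvOps.find? (fun op => op.isPrefixOf (c :: t)) = some op) :
    tokGo cur (c :: t) = cur :: tokGo [] ((c :: t).drop op.length) := by
  rw [tokGo]
  split <;> simp_all

theorem tokGo_none_step (cur : List Char) (c : Char) (t : List Char)
    (hf : pvOps.find? (fun op => op.isPrefixOf (c :: t)) = none) :
    tokGo cur (c :: t) = tokGo (cur ++ [c]) t := by
  rw [tokGo]
  split <;> simp_all

-- bridge: tokGo with accumulator
theorem tokGo_eq : ∀ n l, l.length ≤ n → ∀ cur, tokGo cur l = consHL cur (tok l) := by
  intro n
  induction n with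
  | zero =>
    intro l hl cur
    have : l = [] := by cases l <;> simp_all
    subst this
    simp [tokGo, tok, consHL]
  | succ n ih =>
    intro l hl cur
    rcases l with _ | ⟨c, t⟩
    · simp [tokGo, tok, consHL]
    · rcases hf : pvOps.find? (fun op => op.isPrefixOf (c :: t)) with _ | op
      · rw [tokGo_none_step _ _ _ hf]
        rw [tok_none_eq _ _ hf]
        rw [ih t (by simp at hl; omega) (cur ++ [c])]
        rcases htok : tok t with _ | ⟨y, ys⟩
        · exact absurd htok (tok_ne_nil t)
        · simp [consHL, consH]
      · rw [tokGo_op_eq _ _ _ _ hf]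
        rw [tok_op _ _ _ hf]
        have hop : 1 ≤ op.length := by
          have hm := List.mem_of_find?_eq_some hf
          fin_cases hm <;> simp
        rw [ih ((c :: t).drop op.length) (by simp at hl ⊢; omega) []]
        rcases htok : tok ((c :: t).drop op.length) with _ | ⟨y, ys⟩
        · exact absurd htok (tok_ne_nil _)
        · simp [consHL]

theorem cleanCondition_toList (c : String) :
    (cleanCondition c).toList = clean7 c.toList := by
  simp only [cleanCondition, PySem.Str.toList_replace, clean7]
  rw [show ("OR" : String).toList = ['O','R'] from rfl,
      show ("AND" : String).toList = ['A','N','D'] from rfl,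
      show (">=" : String).toList = ['>','='] from rfl,
      show ("<=" : String).toList = ['<','='] from rfl,
      show ("=" : String).toList = ['='] from rfl,
      show (">" : String).toList = ['>'] from rfl,
      show ("<" : String).toList = ['<'] from rfl,
      show ("," : String).toList = [','] from rfl]
  rw [replace_eq_rep, replace_eq_rep, replace_eq_rep, replace_eq_rep,
      replace_eq_rep, replace_eq_rep, replace_eq_rep]

-- the A-side append loop is filter-after-map
theorem fold_filter (P : String → Bool) (ts : List String) (acc : List String) :
    ts.foldl
      (fun attributes attr0 =>
        let attr := PySem.Str.strip attr0
        if P attr then attributes ++ [attr] else attributes) acc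
      = acc ++ (ts.map (fun tok => PySem.Str.strip tok)).filter P := by
  rw [List.filter_map]
  exact PySem.List.foldl_append_if (fun a => P (PySem.Str.strip a)) (fun a => PySem.Str.strip a) ts acc

-- ===== VERDICT (by name: the statement is the Claim_ definition above) =====
theorem makeAttributesFromCondition_spec : Claim_equal_makeAttributesFromCondition := by
  intro condition tableR tableS _hdom hpre
  unfold Spec_makeAttributesFromCondition
  unfold makeAttributesFromCondition makeAttributesFromCondition_alt
  simp only [cleanCondition_toList, splitOn_eq_spl]
  rw [clean7_eq_joinC_tok condition.toList.length condition.toList le_rfl]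
  rw [spl_joinC _ (tok_ne_nil _) (tok_comma_free condition.toList.length _ le_rfl hpre)]
  rw [tokGo_eq condition.toList.length _ le_rfl []]
  rcases h : tok condition.toList with _ | ⟨x, xs⟩
  · exact absurd h (tok_ne_nil _)
  · simp only [consHL, List.nil_append]
    simpa using fold_filter (fun t => tableS.contains t || tableR.contains t)
      (List.map String.ofList (x :: xs)) []
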